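-- pv_equiv track=rewrite | github.com/windesheim-koen-willemse/eve1-hardw-dp3-imp | model.py | find_amount_of_useless_minutes
-- ===== SOURCE A (Python) =====
-- CHANGE_ENTER = 0
--
-- CHANGE_LEAVE = 1
--
-- def find_amount_of_useless_minutes(change_history):
--     active_people = 0
--     total_useless_mins = 0
--
--     for record_index in range(len(change_history)):
--         record = change_history[record_index]
--
--         if active_people == 0 and record_index > 0:
--             prev_record = change_history[record_index-1]
--             total_useless_mins += record[1] - prev_record[1]
--
--         if record[0] == CHANGE_ENTER:   active_people += 1
--         elif record[0] == CHANGE_LEAVE: active_people -= 1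
--
--     return total_useless_mins
-- ===== SOURCE B (Python) =====
-- def find_amount_of_useless_minutes(change_history):
--     # Pass 1: table of cumulative active counts (count after each record).
--     active_after = []
--     count = 0
--     for record in change_history:
--         if record[0] == 0:
--             count += 1
--         elif record[0] == 1:
--             count -= 1
--         active_after.append(count)
--     # Pass 2: sum the gap before record i whenever nobody was active after record i-1.
--     total = 0
--     for i in range(1, len(change_history)):
--         if active_after[i - 1] == 0:
--             total += change_history[i][1] - change_history[i - 1][1]
--     return total
-- ===== Notes on version B (the rewrite author's own statement) =====
-- stated objective: alternative
-- what changed: Replaced A's single interleaved loop (running active-people counter updated and tested in the same pass) by two separate passes: first build a table of cumulative active counts, then sum the time gaps at indices whose preceding cumulative count is zero.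
import Mathlib
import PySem

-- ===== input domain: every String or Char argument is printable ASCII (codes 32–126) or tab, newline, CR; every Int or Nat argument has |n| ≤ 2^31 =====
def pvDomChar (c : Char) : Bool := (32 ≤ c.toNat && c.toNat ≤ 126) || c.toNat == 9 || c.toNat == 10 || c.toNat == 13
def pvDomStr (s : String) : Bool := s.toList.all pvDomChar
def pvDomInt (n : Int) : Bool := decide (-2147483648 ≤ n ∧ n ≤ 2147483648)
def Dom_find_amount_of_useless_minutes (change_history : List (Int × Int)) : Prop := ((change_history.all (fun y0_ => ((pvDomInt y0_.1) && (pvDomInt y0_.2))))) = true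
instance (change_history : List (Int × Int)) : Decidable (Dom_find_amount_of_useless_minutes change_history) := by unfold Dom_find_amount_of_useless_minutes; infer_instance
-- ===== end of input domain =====

-- B replaces A's single interleaved counting loop by two passes (a cumulative-count table, then a gap summation); alternative decomposition, same O(n) cost.


-- ===== PORT A =====
-- literal port of A: one index loop, state (active_people, total_useless_mins)
def find_amount_of_useless_minutes (change_history : List (Int × Int)) : Int :=
  ((PySem.List.pyRange 0 (change_history.length : Int) 1).foldl
    (fun (st : Int × Int) record_index =>
      let record := PySem.List.pyGetD change_history record_index (0, 0)
      let st :=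
        if st.1 = 0 ∧ record_index > 0 then
          let prev_record := PySem.List.pyGetD change_history (record_index - 1) (0, 0)
          (st.1, st.2 + (record.2 - prev_record.2))
        else st
      if record.1 = 0 then (st.1 + 1, st.2)
      else if record.1 = 1 then (st.1 - 1, st.2)
      else st)
    ((0 : Int), (0 : Int))).2

-- ===== PORT B =====
-- pass 1 of Source B: build active_after (cumulative count after each record)
def pvActivePass (change_history : List (Int × Int)) : List Int × Int :=
  change_history.foldl
    (fun (acc : List Int × Int) record =>
      let count :=
        if record.1 = 0 then acc.2 + 1
        else if record.1 = 1 then acc.2 - 1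
        else acc.2
      (acc.1 ++ [count], count))
    ([], (0 : Int))

def find_amount_of_useless_minutes_alt (change_history : List (Int × Int)) : Int :=
  let active_after := (pvActivePass change_history).1
  (PySem.List.pyRange 1 (change_history.length : Int) 1).foldl
    (fun total i =>
      if PySem.List.pyGetD active_after (i - 1) 0 = 0 then
        total + ((PySem.List.pyGetD change_history i (0, 0)).2
                 - (PySem.List.pyGetD change_history (i - 1) (0, 0)).2)
      else total)
    (0 : Int)

-- ===== PRECONDITION & SPEC =====
def Spec_find_amount_of_useless_minutes (change_history : List (Int × Int)) (out : Int) : Prop := out = find_amount_of_useless_minutes_alt change_history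
instance (change_history : List (Int × Int)) (out : Int) : Decidable (Spec_find_amount_of_useless_minutes change_history out) := by unfold Spec_find_amount_of_useless_minutes; infer_instance

-- ===== CLAIM (what is proved, stated in full; the proofs are below) =====
def Claim_equal_find_amount_of_useless_minutes : Prop := ∀ (change_history : List (Int × Int)), Dom_find_amount_of_useless_minutes change_history → Spec_find_amount_of_useless_minutes change_history (find_amount_of_useless_minutes change_history)

-- ===== LEMMAS AND PROOFS =====

-- the net change one record makes to the active count
def pvDelta (r : Int × Int) : Int :=
  if r.1 = 0 then 1 else if r.1 = 1 then -1 else 0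

-- cumulative active count after the first k records
def pvCnt (ch : List (Int × Int)) (k : Nat) : Int :=
  ((ch.take k).map pvDelta).sum

-- reference value of the answer after the first k iterations
def pvT (ch : List (Int × Int)) : Nat → Int
  | 0 => 0
  | k + 1 =>
      pvT ch k +
        (if 0 < k ∧ pvCnt ch k = 0 then
          (ch.getD k (0, 0)).2 - (ch.getD (k - 1) (0, 0)).2
        else 0)

theorem pvCnt_succ (ch : List (Int × Int)) (k : Nat) (hk : k < ch.length) :
    pvCnt ch (k + 1) = pvCnt ch k + pvDelta ch[k] := by
  simp only [pvCnt, List.take_add_one, List.getElem?_eq_getElem hk, Option.toList_some,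
    List.map_append, List.map_cons, List.map_nil, List.sum_append, List.sum_cons,
    List.sum_nil, add_zero]

-- characterisation of B's first pass
theorem pvActivePass_spec (ch : List (Int × Int)) :
    ∀ (l : List Int) (c : Int),
      ch.foldl
        (fun (acc : List Int × Int) record =>
          let count :=
            if record.1 = 0 then acc.2 + 1
            else if record.1 = 1 then acc.2 - 1
            else acc.2
          (acc.1 ++ [count], count))
        (l, c)
      = (l ++ (List.range ch.length).map (fun j => c + pvCnt ch (j + 1)),
         c + pvCnt ch ch.length) := by
  induction ch with
  | nil => intro l c; simp [pvCnt]
  | cons r t ih =>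
      intro l c
      simp only [List.foldl_cons]
      rw [ih]
      have hd : (if r.1 = 0 then c + 1 else if r.1 = 1 then c - 1 else c) = c + pvDelta r := by
        unfold pvDelta; split_ifs <;> ring
      have hcnt : ∀ j, pvCnt (r :: t) (j + 1) = pvDelta r + pvCnt t j := by
        intro j; simp [pvCnt]
      rw [hd]
      simp only [Prod.mk.injEq]
      refine ⟨?_, by rw [List.length_cons, hcnt t.length]; ring⟩
      rw [List.length_cons, List.range_succ_eq_map, List.map_cons, List.map_map,
        List.append_assoc, List.singleton_append]
      congr 1
      rw [hcnt 0]
      simp [pvCnt]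
      intro a _
      ring

theorem pvActive_getElem (ch : List (Int × Int)) (j : Nat) (hj : j < ch.length) :
    (pvActivePass ch).1.getD j 0 = pvCnt ch (j + 1) := by
  have h := pvActivePass_spec ch [] 0
  unfold pvActivePass
  rw [h]
  simp [List.getD, List.getElem?_map, (List.getElem?_range hj : (List.range ch.length)[j]? = some j)]

-- A's loop state after the first n iterations
theorem pvA_state (ch : List (Int × Int)) :
    ∀ n : Nat, n ≤ ch.length →
      ((PySem.List.pyRange 0 (n : Int) 1).foldl
        (fun (st : Int × Int) record_index =>
          let record := PySem.List.pyGetD ch record_index (0, 0)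
          let st :=
            if st.1 = 0 ∧ record_index > 0 then
              let prev_record := PySem.List.pyGetD ch (record_index - 1) (0, 0)
              (st.1, st.2 + (record.2 - prev_record.2))
            else st
          if record.1 = 0 then (st.1 + 1, st.2)
          else if record.1 = 1 then (st.1 - 1, st.2)
          else st)
        ((0 : Int), (0 : Int)))
      = (pvCnt ch n, pvT ch n) := by
  intro n
  induction n with
  | zero => intro _; simp [PySem.List.pyRange_one_eq_nil, pvCnt, pvT]
  | succ k ih =>
      intro hk
      have hk' : k < ch.length := by omega
      have : ((k : Int) + 1) = ((k + 1 : Nat) : Int) := by push_cast; ring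
      rw [← this, PySem.List.pyRange_one_succ_right (by exact_mod_cast Nat.zero_le k),
          List.foldl_append, ih (by omega)]
      simp only [List.foldl_cons, List.foldl_nil]
      have hget : PySem.List.pyGetD ch (k : Int) (0, 0) = ch[k] := by
        rw [PySem.List.pyGetD_natCast]
        simp [List.getD, List.getElem?_eq_getElem hk']
      rw [pvCnt_succ ch k hk']
      by_cases hz : pvCnt ch k = 0 ∧ (k : Int) > 0
      · have hkpos : 0 < k := by exact_mod_cast hz.2
        have hprev : ((k : Int) - 1) = ((k - 1 : Nat) : Int) := by omega
        have hgetp : PySem.List.pyGetD ch ((k : Int) - 1) (0, 0) = ch.getD (k - 1) (0, 0) := by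
          rw [hprev, PySem.List.pyGetD_natCast]
        simp only [hget, hgetp, if_pos hz]
        have hT : pvT ch (k + 1) = pvT ch k + ((ch.getD k (0, 0)).2 - (ch.getD (k - 1) (0, 0)).2) := by
          simp [pvT, hkpos, hz.1]
        have hgd : ch.getD k (0, 0) = ch[k] := by
          simp [List.getD, List.getElem?_eq_getElem hk']
        rw [hT, hgd]
        simp [pvDelta]
        split_ifs <;> simp [hz.1]
      · simp only [hget, if_neg hz]
        have hT : pvT ch (k + 1) = pvT ch k := by
          simp only [pvT]
          rw [if_neg]
          · ring
          · intro ⟨h1, h2⟩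
            exact hz ⟨h2, by exact_mod_cast h1⟩
        rw [hT]
        simp [pvDelta]
        split_ifs <;> ring
  -- done

-- B's summation pass computes the same reference value
theorem pvB_sum (ch : List (Int × Int)) :
    ∀ n : Nat, n ≤ ch.length →
      ((PySem.List.pyRange 1 (n : Int) 1).foldl
        (fun total i =>
          if PySem.List.pyGetD (pvActivePass ch).1 (i - 1) 0 = 0 then
            total + ((PySem.List.pyGetD ch i (0, 0)).2
                     - (PySem.List.pyGetD ch (i - 1) (0, 0)).2)
          else total)
        (0 : Int))
      = pvT ch n := by
  intro n
  induction n with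
  | zero => intro _; simp [PySem.List.pyRange_one_eq_nil, pvT]
  | succ k ih =>
      intro hk
      have hk' : k < ch.length := by omega
      by_cases hk0 : k = 0
      · subst hk0
        simp [PySem.List.pyRange_one_eq_nil, pvT]
      · have hkpos : 0 < k := Nat.pos_of_ne_zero hk0
        have hcast : ((k : Int) + 1) = ((k + 1 : Nat) : Int) := by push_cast; ring
        rw [← hcast, PySem.List.pyRange_one_succ_right (by exact_mod_cast hkpos),
            List.foldl_append, ih (by omega)]
        simp only [List.foldl_cons, List.foldl_nil]
        have hprev : ((k : Int) - 1) = ((k - 1 : Nat) : Int) := by omega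
        have haa : PySem.List.pyGetD (pvActivePass ch).1 ((k : Int) - 1) 0 = pvCnt ch k := by
          rw [hprev, PySem.List.pyGetD_natCast]
          have := pvActive_getElem ch (k - 1) (by omega)
          rw [this]
          congr 1
          omega
        have hget : PySem.List.pyGetD ch (k : Int) (0, 0) = ch.getD k (0, 0) := by
          rw [PySem.List.pyGetD_natCast]
        have hgetp : PySem.List.pyGetD ch ((k : Int) - 1) (0, 0) = ch.getD (k - 1) (0, 0) := by
          rw [hprev, PySem.List.pyGetD_natCast]
        rw [haa, hget, hgetp]
        simp only [pvT]
        by_cases hz : pvCnt ch k = 0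
        · simp [hz, hkpos]
        · simp [hz]

-- ===== VERDICT (by name: the statement is the Claim_ definition above) =====
theorem find_amount_of_useless_minutes_spec : Claim_equal_find_amount_of_useless_minutes := by
  intro ch _
  unfold Spec_find_amount_of_useless_minutes find_amount_of_useless_minutes find_amount_of_useless_minutes_alt
  rw [pvA_state ch ch.length le_rfl, pvB_sum ch ch.length le_rfl]
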